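-- pv_equiv track=rewrite | github.com/paras-a/Data-Structures-and-Algorithms | recursion.py | is_power_of_ten
-- ===== SOURCE A (Python) =====
-- def is_power_of_ten(n):
--     """
--     Check if a number is a power of 10 using recursion.
--
--     @param n: A positive integer
--     @return: True if n is a power of 10, False otherwise
--     @rtype: bool
--
--     Examples:
--         >>> is_power_of_ten(100)
--         True
--         >>> is_power_of_ten(50)
--         False
--     """
--     if n <= 0:
--         raise ValueError("n must be a positive integer")
--     if n == 1:
--         return True
--     if 1 < n < 10:
--         return False
--     return True and is_power_of_ten(n//10)
-- ===== SOURCE B (Python) =====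
-- def is_power_of_ten(n):
--     """Iterative re-implementation: strip digits in a loop, then test the leading digit."""
--     if n <= 0:
--         raise ValueError("n must be a positive integer")
--     while n >= 10:
--         n //= 10
--     return n == 1
-- ===== Notes on version B (the rewrite author's own statement) =====
-- stated objective: simpler
-- what changed: Replaces the recursion (with its three-way branch and 'True and' recursive call) by an explicit while-loop that keeps the running quotient in a variable and a single final 'n == 1' test.
import Mathlib
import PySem

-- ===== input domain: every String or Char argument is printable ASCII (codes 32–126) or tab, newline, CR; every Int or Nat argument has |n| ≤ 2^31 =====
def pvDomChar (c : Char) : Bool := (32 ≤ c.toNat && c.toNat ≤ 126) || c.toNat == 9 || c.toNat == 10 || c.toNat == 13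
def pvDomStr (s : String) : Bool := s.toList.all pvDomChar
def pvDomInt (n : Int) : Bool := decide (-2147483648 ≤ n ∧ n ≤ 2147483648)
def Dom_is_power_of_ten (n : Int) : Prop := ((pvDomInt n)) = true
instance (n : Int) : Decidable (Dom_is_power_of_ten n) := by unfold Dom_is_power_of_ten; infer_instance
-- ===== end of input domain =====

-- B replaces A's recursion by an explicit while-loop keeping the running quotient, then one final test; objective: simpler.


-- ===== PORT A =====
-- A raises ValueError on n ≤ 0 (excluded by Pre_); the port returns false there.
def is_power_of_ten (n : Int) : Bool :=
  if _h0 : n ≤ 0 then false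
  else if n = 1 then true
  else if 1 < n ∧ n < 10 then false
  else true && is_power_of_ten (PySem.Int.floordiv n 10)
termination_by n.toNat
decreasing_by
  have h : PySem.Int.floordiv n 10 = n / 10 := PySem.Int.floordiv_eq_ediv_of_pos (by omega)
  rw [h]; omega

-- ===== PORT B =====
-- the while-loop:  while n >= 10: n //= 10
def powTenLoop (n : Int) : Int :=
  if _h : n ≥ 10 then powTenLoop (PySem.Int.floordiv n 10) else n
termination_by n.toNat
decreasing_by
  have h : PySem.Int.floordiv n 10 = n / 10 := PySem.Int.floordiv_eq_ediv_of_pos (by omega)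
  rw [h]; omega

-- B raises ValueError on n ≤ 0 (excluded by Pre_); the port returns false there.
def is_power_of_ten_alt (n : Int) : Bool :=
  if n ≤ 0 then false else decide (powTenLoop n = 1)

-- ===== PRECONDITION & SPEC =====
-- Pre_ excludes n ≤ 0, on which both A and B raise ValueError.
def Pre_is_power_of_ten (n : Int) : Prop := 1 ≤ n
instance (n : Int) : Decidable (Pre_is_power_of_ten n) := by unfold Pre_is_power_of_ten; infer_instance
def pvWitness_is_power_of_ten : Int := (100)

def Spec_is_power_of_ten (n : Int) (out : Bool) : Prop := out = is_power_of_ten_alt n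
instance (n : Int) (out : Bool) : Decidable (Spec_is_power_of_ten n out) := by unfold Spec_is_power_of_ten; infer_instance

-- ===== CLAIM (what is proved, stated in full; the proofs are below) =====
def Claim_equal_is_power_of_ten : Prop := ∀ (n : Int), Dom_is_power_of_ten n → Pre_is_power_of_ten n → Spec_is_power_of_ten n (is_power_of_ten n)

-- ===== LEMMAS AND PROOFS =====
theorem is_power_of_ten_eq_loop (n : Int) (hn : 1 ≤ n) :
    is_power_of_ten n = decide (powTenLoop n = 1) := by
  by_cases h10 : n ≥ 10
  · have hfd : PySem.Int.floordiv n 10 = n / 10 := PySem.Int.floordiv_eq_ediv_of_pos (by omega)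
    have hrec : 1 ≤ PySem.Int.floordiv n 10 := by rw [hfd]; omega
    have ih := is_power_of_ten_eq_loop (PySem.Int.floordiv n 10) hrec
    rw [is_power_of_ten, powTenLoop,
        dif_neg (show ¬ n ≤ 0 by omega), dif_pos h10,
        if_neg (show ¬ n = 1 by omega), if_neg (show ¬ (1 < n ∧ n < 10) by omega)]
    rw [Bool.true_and, ih]
  · rw [is_power_of_ten, powTenLoop,
        dif_neg (show ¬ n ≤ 0 by omega), dif_neg h10]
    by_cases h1 : n = 1
    · simp [h1]
    · rw [if_neg h1, if_pos (show 1 < n ∧ n < 10 by omega)]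
      simp [h1]
termination_by n.toNat
decreasing_by
  have h : PySem.Int.floordiv n 10 = n / 10 := PySem.Int.floordiv_eq_ediv_of_pos (by omega)
  rw [h]; omega

-- ===== VERDICT (by name: the statement is the Claim_ definition above) =====
theorem is_power_of_ten_spec : Claim_equal_is_power_of_ten := by
  intro n _ hpre
  have h1 : 1 ≤ n := hpre
  unfold Spec_is_power_of_ten is_power_of_ten_alt
  rw [if_neg (show ¬ n ≤ 0 by omega), is_power_of_ten_eq_loop n h1]
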